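-- pv_equiv track=rewrite | github.com/onixlas/leetcode-interviews | 000_Max_Consecutive_Ones_Variant/solution.py | max_ones_after_remove_one
-- ===== SOURCE A (Python) =====
-- def max_ones_after_remove_one(nums: list[int]) -> int:
--     """
--     Finds the maximum length of a consecutive subarray of 1s after removing exactly one element (0 or 1).
--
--     :param nums: A list of integers containing only 0s and 1s.
--     :return: The maximum length of consecutive 1s achievable by deleting exactly one element from the list.
--     """
--     left = 0
--
--     zero_position = -1
--     zero_counter = 0
--     max_counter = 0
--
--     for right in range(len(nums)):
--         if nums[right] == 0:
--             if zero_counter == 1: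
--                 left = zero_position + 1
--                 zero_counter -= 1
--             zero_counter += 1
--             zero_position = right
--         max_counter = max(max_counter, right - left + 1 - zero_counter)
--
--     return max_counter
-- ===== SOURCE B (Python) =====
-- def max_ones_after_remove_one(nums: list[int]) -> int:
--     """Single pass with two run counters instead of a sliding window."""
--     prev = curr = best = 0
--     for x in nums:
--         if x == 0:
--             prev, curr = curr, 0
--         else:
--             curr += 1
--         best = max(best, prev + curr)
--     return best
-- ===== Notes on version B (the rewrite author's own statement) =====
-- stated objective: simpler
-- what changed: Replaces the sliding window with left pointer, last zero position and zero counter by a single pass over the elements keeping only two run lengths (current run of nonzeros and the run before the last zero) and their running maximum.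
import Mathlib
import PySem

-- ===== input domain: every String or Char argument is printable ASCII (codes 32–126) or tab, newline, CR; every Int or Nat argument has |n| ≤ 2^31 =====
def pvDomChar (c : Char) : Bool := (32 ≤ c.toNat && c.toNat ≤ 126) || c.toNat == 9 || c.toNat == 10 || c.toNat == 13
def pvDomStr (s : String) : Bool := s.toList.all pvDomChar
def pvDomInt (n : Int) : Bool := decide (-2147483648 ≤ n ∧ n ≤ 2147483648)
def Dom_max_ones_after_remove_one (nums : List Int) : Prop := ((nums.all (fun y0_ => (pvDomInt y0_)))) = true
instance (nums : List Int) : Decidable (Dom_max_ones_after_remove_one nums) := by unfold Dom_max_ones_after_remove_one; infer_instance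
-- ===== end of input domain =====

-- B replaces A's sliding window (left pointer + last-zero position + zero counter)
-- by a single pass keeping two run lengths; objective: simpler.


-- ===== PORT A =====
-- loop over right = 0,1,…: rest is nums[right:], state (left, zero_position, zero_counter, max_counter)
def maxOnesLoopA : List Int → Int → Int → Int → Int → Int → Int
  | [], _, _, _, _, mc => mc
  | x :: xs, right, left, zp, zc, mc =>
    if x = 0 then
      let left' := if zc = 1 then zp + 1 else left
      let zc' := (if zc = 1 then zc - 1 else zc) + 1
      maxOnesLoopA xs (right + 1) left' right zc' (max mc (right - left' + 1 - zc'))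
    else
      maxOnesLoopA xs (right + 1) left zp zc (max mc (right - left + 1 - zc))

def max_ones_after_remove_one (nums : List Int) : Int :=
  maxOnesLoopA nums 0 0 (-1) 0 0

-- ===== PORT B =====
-- for x in nums: state (prev, curr, best)
def maxOnesLoopB : List Int → Int → Int → Int → Int
  | [], _, _, best => best
  | x :: xs, prev, curr, best =>
    if x = 0 then
      maxOnesLoopB xs curr 0 (max best (curr + 0))
    else
      maxOnesLoopB xs prev (curr + 1) (max best (prev + (curr + 1)))

def max_ones_after_remove_one_alt (nums : List Int) : Int :=
  maxOnesLoopB nums 0 0 0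

-- ===== PRECONDITION & SPEC =====
def Spec_max_ones_after_remove_one (nums : List Int) (out : Int) : Prop := out = max_ones_after_remove_one_alt nums
instance (nums : List Int) (out : Int) : Decidable (Spec_max_ones_after_remove_one nums out) := by unfold Spec_max_ones_after_remove_one; infer_instance

-- ===== CLAIM (what is proved, stated in full; the proofs are below) =====
def Claim_equal_max_ones_after_remove_one : Prop := ∀ (nums : List Int), Dom_max_ones_after_remove_one nums → Spec_max_ones_after_remove_one nums (max_ones_after_remove_one nums)

-- ===== LEMMAS AND PROOFS =====

-- Invariant linking A's window state to B's two run counters after any processed prefix.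
theorem maxOnesLoop_eq : ∀ (xs : List Int) (right left zp zc mc prev curr best : Int),
    mc = best →
    ((zc = 0 ∧ left = 0 ∧ zp = -1 ∧ prev = 0 ∧ curr = right) ∨
     (zc = 1 ∧ curr = right - 1 - zp ∧ prev = zp - left)) →
    maxOnesLoopA xs right left zp zc mc = maxOnesLoopB xs prev curr best := by
  intro xs
  induction xs with
  | nil => intro _ _ _ _ mc _ _ best hmc _; simpa [maxOnesLoopA, maxOnesLoopB] using hmc
  | cons x xs ih =>
    intro right left zp zc mc prev curr best hmc hinv
    by_cases hx : x = 0
    · rcases hinv with ⟨h0, hl, hz, hp, hc⟩ | ⟨h1, hc, hp⟩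
      · subst h0 hl hz hp hc
        simp only [maxOnesLoopA, maxOnesLoopB, hx, show ¬((0:Int)=1) by omega,
          if_false, if_true]
        exact ih _ _ _ _ _ _ _ _ (by omega) (Or.inr (by omega))
      · subst h1 hc hp
        simp only [maxOnesLoopA, maxOnesLoopB, hx, if_true]
        exact ih _ _ _ _ _ _ _ _ (by omega) (Or.inr (by omega))
    · rcases hinv with ⟨h0, hl, hz, hp, hc⟩ | ⟨h1, hc, hp⟩
      · simp only [maxOnesLoopA, maxOnesLoopB, if_neg hx]
        exact ih _ _ _ _ _ _ _ _ (by omega) (Or.inl (by omega))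
      · simp only [maxOnesLoopA, maxOnesLoopB, if_neg hx]
        exact ih _ _ _ _ _ _ _ _ (by omega) (Or.inr (by omega))

-- ===== VERDICT (by name: the statement is the Claim_ definition above) =====
theorem max_ones_after_remove_one_spec : Claim_equal_max_ones_after_remove_one := by
  intro nums _
  show max_ones_after_remove_one nums = max_ones_after_remove_one_alt nums
  exact maxOnesLoop_eq nums 0 0 (-1) 0 0 0 0 0 rfl (Or.inl (by norm_num))
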